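-- pv_equiv track=rewrite | github.com/h-kayotin/hanayo_homework | let_code/链表/59_统计已测试设备.py | count_test_devices
-- ===== SOURCE A (Python) =====
-- def count_test_devices(batteryPercentages: list[int]):
--     bat_arr = batteryPercentages
--     count = 0
--     for i in range(len(bat_arr)):
--         if bat_arr[i] > 0:
--             count += 1
--             for j in range(i, len(bat_arr)):
--                 bat_arr[j] = max(0, bat_arr[j] - 1)
--     return count
-- ===== SOURCE B (Python) =====
-- def count_test_devices(batteryPercentages: list[int]):
--     count = 0
--     for x in batteryPercentages:
--         if x > count:
--             count += 1
--     return count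
-- ===== Notes on version B (the rewrite author's own statement) =====
-- stated objective: faster
-- what changed: Replaces the nested decrement-the-suffix loop with a single pass that increments the count whenever the current battery exceeds the number of devices tested so far (and does not mutate the input list).
import Mathlib
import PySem

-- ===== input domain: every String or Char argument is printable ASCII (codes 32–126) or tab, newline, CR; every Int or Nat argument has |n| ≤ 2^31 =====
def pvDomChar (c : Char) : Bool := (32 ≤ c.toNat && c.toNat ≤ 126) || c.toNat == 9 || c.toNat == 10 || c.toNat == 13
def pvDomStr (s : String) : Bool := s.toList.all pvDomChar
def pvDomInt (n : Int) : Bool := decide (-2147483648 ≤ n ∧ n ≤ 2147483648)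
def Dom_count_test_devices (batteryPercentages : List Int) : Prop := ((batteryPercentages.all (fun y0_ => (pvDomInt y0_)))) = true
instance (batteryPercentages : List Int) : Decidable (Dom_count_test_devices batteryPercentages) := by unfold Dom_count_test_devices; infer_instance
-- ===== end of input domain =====

-- B replaces A's nested decrement-the-suffix loop by a single pass ("battery > count so far");
-- A mutates its argument in place in Python, B does not: the equivalence proved is about the return value only.

-- ===== PORT A =====
-- inner loop: for j in range(i, len(bat_arr)): bat_arr[j] = max(0, bat_arr[j] - 1)
def ctdInner (arr : List Int) (j : Nat) : List Int :=
  arr.set j (max 0 (arr.getD j 0 - 1))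

-- one iteration of the outer loop (n = len(bat_arr), i = loop index, state = (bat_arr, count))
def ctdStep (n : Nat) (st : List Int × Int) (i : Nat) : List Int × Int :=
  if st.1.getD i 0 > 0 then
    ((List.range' i (n - i)).foldl ctdInner st.1, st.2 + 1)
  else st

def count_test_devices (batteryPercentages : List Int) : Int :=
  ((List.range batteryPercentages.length).foldl (ctdStep batteryPercentages.length)
    (batteryPercentages, 0)).2

-- ===== PORT B =====
def count_test_devices_alt (batteryPercentages : List Int) : Int :=
  batteryPercentages.foldl (fun count x => if x > count then count + 1 else count) 0

-- ===== PRECONDITION & SPEC =====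
def Spec_count_test_devices (batteryPercentages : List Int) (out : Int) : Prop := out = count_test_devices_alt batteryPercentages
instance (batteryPercentages : List Int) (out : Int) : Decidable (Spec_count_test_devices batteryPercentages out) := by unfold Spec_count_test_devices; infer_instance

-- ===== CLAIM (what is proved, stated in full; the proofs are below) =====
def Claim_equal_count_test_devices : Prop := ∀ (batteryPercentages : List Int), Dom_count_test_devices batteryPercentages → Spec_count_test_devices batteryPercentages (count_test_devices batteryPercentages)

-- ===== LEMMAS AND PROOFS =====

-- functional restatement of A's outer loop, used only inside the proofs
def ctdRun : List Int → Int → Int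
  | [], c => c
  | x :: t, c =>
    if x > 0 then ctdRun (t.map (fun y => max 0 (y - 1))) (c + 1) else ctdRun t c
termination_by ys _ => ys.length
decreasing_by all_goals simp

theorem ctd_getD_append (pre : List Int) (x : Int) (t : List Int) :
    (pre ++ x :: t).getD pre.length 0 = x := by
  induction pre with
  | nil => rfl
  | cons a pre ih => simpa using ih

theorem ctd_inner_fold (cur : List Int) : ∀ (pre : List Int),
    (List.range' pre.length cur.length).foldl ctdInner (pre ++ cur)
      = pre ++ cur.map (fun y => max 0 (y - 1)) := by
  induction cur with
  | nil => intro pre; simp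
  | cons x t ih =>
    intro pre
    have h1 : ctdInner (pre ++ x :: t) pre.length = pre ++ max 0 (x - 1) :: t := by
      simp [ctdInner]
    rw [List.length_cons, List.range'_succ, List.foldl_cons, h1]
    have h2 := ih (pre ++ [max 0 (x - 1)])
    simpa using h2

theorem ctd_outer_fold (n : Nat) : ∀ (cur : List Int), cur.length = n → ∀ (pre : List Int) (c : Int),
    ((List.range' pre.length n).foldl (ctdStep (pre.length + n)) (pre ++ cur, c)).2 = ctdRun cur c := by
  induction n with
  | zero =>
    intro cur hlen pre c
    have : cur = [] := List.eq_nil_of_length_eq_zero hlen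
    subst this
    simp [ctdRun]
  | succ n ih =>
    intro cur hlen pre c
    match cur, hlen with
    | x :: t, hlen =>
      have ht : t.length = n := by simpa using hlen
      rw [List.range'_succ, List.foldl_cons]
      by_cases hx : x > 0
      · have hn : pre.length + (n + 1) - pre.length = (x :: t).length := by simp [ht]
        have hstep : ctdStep (pre.length + (n + 1)) (pre ++ x :: t, c) pre.length
            = (pre ++ max 0 (x - 1) :: t.map (fun y => max 0 (y - 1)), c + 1) := by
          simp only [ctdStep, ctd_getD_append, hx, if_pos, hn]
          rw [ctd_inner_fold (x :: t) pre]
          simp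
        rw [hstep]
        have h2 := ih (t.map (fun y => max 0 (y - 1))) (by simp [ht])
          (pre ++ [max 0 (x - 1)]) (c + 1)
        simp only [List.length_append, List.length_cons, List.length_nil, Nat.zero_add,
          List.append_assoc, List.singleton_append] at h2
        have harr : pre.length + 1 + n = pre.length + (n + 1) := by omega
        rw [harr] at h2
        rw [h2]
        simp [ctdRun, hx]
      · have hstep : ctdStep (pre.length + (n + 1)) (pre ++ x :: t, c) pre.length
            = (pre ++ x :: t, c) := by
          simp [ctdStep, hx]
        rw [hstep]
        have h2 := ih t ht (pre ++ [x]) c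
        simp only [List.length_append, List.length_cons, List.length_nil, Nat.zero_add,
          List.append_assoc, List.singleton_append] at h2
        have harr : pre.length + 1 + n = pre.length + (n + 1) := by omega
        rw [harr] at h2
        rw [h2]
        simp [ctdRun, hx]

-- ctdRun on a "suffix already decremented d times" list equals B's single pass with counter d
theorem ctd_run_eq_fold (xs : List Int) : ∀ (ys : List Int) (d : Int),
    (ys = xs.map (fun y => max 0 (y - d)) ∨ (d = 0 ∧ ys = xs)) →
    ctdRun ys d = xs.foldl (fun count x => if x > count then count + 1 else count) d := by
  induction xs with
  | nil =>
    intro ys d h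
    rcases h with h | ⟨_, h⟩ <;> simp [h, ctdRun]
  | cons x t ih =>
    intro ys d h
    have hcomp : ∀ (e : Int), (fun y => max 0 (max 0 (y - e) - 1)) = (fun y => max 0 (y - (e + 1))) := by
      intro e; funext y; omega
    rcases h with h | ⟨hd, h⟩
    · subst h
      simp only [List.map_cons, List.foldl_cons]
      rw [ctdRun]
      by_cases hx : x > d
      · have hpos : max 0 (x - d) > 0 := by omega
        rw [if_pos hpos, if_pos hx]
        have hmm : (t.map (fun y => max 0 (y - d))).map (fun y => max 0 (y - 1))
            = t.map (fun y => max 0 (y - (d + 1))) := by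
          simp only [List.map_map, Function.comp_def]; rw [hcomp d]
        rw [hmm]
        exact ih _ (d + 1) (Or.inl rfl)
      · have hnpos : ¬ max 0 (x - d) > 0 := by omega
        rw [if_neg hnpos, if_neg hx]
        exact ih _ d (Or.inl rfl)
    · subst hd; subst h
      rw [List.foldl_cons, ctdRun]
      by_cases hx : x > 0
      · rw [if_pos hx, if_pos hx]
        have hmm : t.map (fun y => max 0 (y - 1)) = t.map (fun y => max 0 (y - (0 + 1))) := by
          norm_num
        rw [hmm]
        exact ih _ (0 + 1) (Or.inl rfl)
      · rw [if_neg hx, if_neg hx]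
        exact ih t 0 (Or.inr ⟨rfl, rfl⟩)

-- ===== VERDICT (by name: the statement is the Claim_ definition above) =====
theorem count_test_devices_spec : Claim_equal_count_test_devices := by
  intro bp _
  unfold Spec_count_test_devices count_test_devices count_test_devices_alt
  have h := ctd_outer_fold bp.length bp rfl [] 0
  simp only [List.length_nil, Nat.zero_add] at h
  rw [List.range_eq_range', List.nil_append] at *
  rw [h]
  exact ctd_run_eq_fold bp bp 0 (Or.inr ⟨rfl, rfl⟩)
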